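-- pv_equiv track=rewrite | github.com/IBM/data-prep-lab | transforms/code/code_quality/src/code_quality_transform.py | has_no_keywords
-- ===== SOURCE A (Python) =====
-- def has_no_keywords(data, language):
--     """
--     Check if a python file has none of the keywords for: funcion, class, for loop, while loop.
--     """
--     if language.lower() == "python":
--         keywords = ["def ", "class ", "for ", "while "]
--         lines = data.splitlines()
--         for line in lines:
--             for keyword in keywords:
--                 if keyword in line.lower():
--                     return False
--         return True
--     return False
-- ===== SOURCE B (Python) =====
-- def has_no_keywords(data, language):
--     """
--     Check if a python file has none of the keywords for: funcion, class, for loop, while loop.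
--     """
--     if language.lower() != "python":
--         return False
--     lowered = data.lower()
--     return not any(kw in lowered for kw in ("def ", "class ", "for ", "while "))
-- ===== Notes on version B (the rewrite author's own statement) =====
-- stated objective: simpler
-- what changed: B drops the splitlines pass and the nested per-line/per-keyword loops: it lowercases the whole text once and tests each keyword against it directly (no keyword contains a line separator, so whole-text membership equals per-line membership), with an early return for non-python.
import Mathlib
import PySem

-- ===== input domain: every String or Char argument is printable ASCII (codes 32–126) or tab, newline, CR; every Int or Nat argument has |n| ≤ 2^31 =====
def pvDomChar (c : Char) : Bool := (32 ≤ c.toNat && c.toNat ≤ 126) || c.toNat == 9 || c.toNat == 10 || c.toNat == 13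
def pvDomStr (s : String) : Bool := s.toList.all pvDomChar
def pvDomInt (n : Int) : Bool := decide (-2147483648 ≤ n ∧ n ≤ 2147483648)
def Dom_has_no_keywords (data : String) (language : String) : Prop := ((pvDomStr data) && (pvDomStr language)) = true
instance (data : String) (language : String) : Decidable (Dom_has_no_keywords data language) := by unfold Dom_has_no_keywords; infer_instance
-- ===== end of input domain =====

-- B lowercases the whole text once and tests each keyword against it directly (no keyword
-- contains a line separator), dropping A's splitlines pass and per-line loop; objective: simpler.

-- ===== PORT A =====
-- inner 'for keyword in keywords: if keyword in line.lower(): return False'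
def pvAInner : List (List Char) → List Char → Bool
  | [], _ => false
  | kw :: kws, line =>
    if PySem.Chars.isIn kw (PySem.Chars.lower line) then true else pvAInner kws line

-- outer 'for line in lines: … / return True'
def pvALines (kws : List (List Char)) : List (List Char) → Bool
  | [] => true
  | l :: ls => if pvAInner kws l then false else pvALines kws ls

def has_no_keywords (data : String) (language : String) : Bool :=
  if PySem.Str.lower language == "python" then
    pvALines ["def ".toList, "class ".toList, "for ".toList, "while ".toList]
      (PySem.Chars.splitlines data.toList)
  else false

-- ===== PORT B =====
def has_no_keywords_alt (data : String) (language : String) : Bool :=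
  if PySem.Str.lower language != "python" then false
  else
    let lowered := PySem.Chars.lower data.toList
    !(["def ".toList, "class ".toList, "for ".toList, "while ".toList].any
        (fun kw => PySem.Chars.isIn kw lowered))

-- ===== PRECONDITION & SPEC =====
def Spec_has_no_keywords (data : String) (language : String) (out : Bool) : Prop := out = has_no_keywords_alt data language
instance (data : String) (language : String) (out : Bool) : Decidable (Spec_has_no_keywords data language out) := by unfold Spec_has_no_keywords; infer_instance

-- ===== CLAIM (what is proved, stated in full; the proofs are below) =====
def Claim_equal_has_no_keywords : Prop := ∀ (data : String) (language : String), Dom_has_no_keywords data language → Spec_has_no_keywords data language (has_no_keywords data language)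

-- ===== LEMMAS AND PROOFS =====

-- the line-break predicate used by PySem.Chars.splitlines, as a named definition
def pvIsB (c : Char) : Bool :=
  have n := c.toNat;
  decide (n = 10) || decide (n = 13) || decide (n = 11) || decide (n = 12) || decide (n = 28) || decide (n = 29) ||
          decide (n = 30) ||
        decide (n = 133) ||
      decide (n = 8232) ||
    decide (n = 8233)

theorem pv_splitlines_eq (s : List Char) :
    PySem.Chars.splitlines s = PySem.Chars.splitlines.go pvIsB s [] [] := rfl

theorem pv_go_nil (cur : List Char) (acc : List (List Char)) :
    PySem.Chars.splitlines.go pvIsB [] cur acc =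
      if cur.isEmpty then acc.reverse else (cur.reverse :: acc).reverse := rfl

theorem pv_go_crlf (rest cur : List Char) (acc : List (List Char)) :
    PySem.Chars.splitlines.go pvIsB ('\x0d' :: '\n' :: rest) cur acc =
      PySem.Chars.splitlines.go pvIsB rest [] (cur.reverse :: acc) := rfl

theorem pv_go_cons (c : Char) (rest cur : List Char) (acc : List (List Char))
    (h : ¬(c = '\x0d' ∧ '\n' ∈ rest.take 1)) :
    PySem.Chars.splitlines.go pvIsB (c :: rest) cur acc =
      if pvIsB c then PySem.Chars.splitlines.go pvIsB rest [] (cur.reverse :: acc)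
      else PySem.Chars.splitlines.go pvIsB rest (c :: cur) acc := by
  rw [PySem.Chars.splitlines.go.eq_def]
  split
  next heq => simp at heq
  next r heq =>
    simp only [List.cons.injEq] at heq
    exact absurd ⟨heq.1, by simp [heq.2]⟩ h
  next c' r heq h2 =>
    injection h2 with h3 h4
    rw [h3, h4]

-- the accumulator of splitlines.go only prepends already-finished lines
theorem pv_go_acc (n : Nat) : ∀ (s : List Char), s.length ≤ n → ∀ cur acc,
    PySem.Chars.splitlines.go pvIsB s cur acc =
      acc.reverse ++ PySem.Chars.splitlines.go pvIsB s cur [] := by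
  induction n with
  | zero =>
    intro s hs cur acc
    rw [List.eq_nil_of_length_eq_zero (Nat.le_zero.mp hs)]
    rw [pv_go_nil, pv_go_nil]; split <;> simp
  | succ n ih =>
    intro s hs cur acc
    cases s with
    | nil => rw [pv_go_nil, pv_go_nil]; split <;> simp
    | cons c rest =>
      by_cases hc : c = '\x0d' ∧ '\n' ∈ rest.take 1
      · obtain ⟨rfl, hn⟩ := hc
        cases rest with
        | nil => simp at hn
        | cons c2 r =>
          simp at hn; subst hn
          rw [pv_go_crlf, pv_go_crlf]
          rw [ih r (by simp at hs; omega), ih r (by simp at hs; omega) [] [List.reverse cur]]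
          simp
      · rw [pv_go_cons c rest cur acc hc, pv_go_cons c rest cur [] hc]
        split
        · rw [ih rest (by simp at hs; omega), ih rest (by simp at hs; omega) [] [List.reverse cur]]
          simp
        · exact ih rest (by simp at hs; omega) (c :: cur) acc

-- a prefix avoiding b never reaches past a in a ++ b :: c
theorem pv_prefix_split (b : Char) : ∀ (a : List Char) (kw : List Char), b ∉ kw →
    (kw <+: a ++ b :: c ↔ kw <+: a) := by
  intro a
  induction a with
  | nil =>
    intro kw hb
    cases kw with
    | nil => simp
    | cons k ks =>
      simp only [List.nil_append]
      constructor
      · intro h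
        rcases List.cons_prefix_cons.mp h with ⟨rfl, -⟩
        exact absurd (List.mem_cons_self) hb
      · intro h; exact absurd h (by simp)
  | cons x a' ihp =>
    intro kw hb
    cases kw with
    | nil => simp
    | cons k ks =>
      simp only [List.cons_append, List.cons_prefix_cons]
      rw [ihp ks (fun hm => hb (List.mem_cons_of_mem _ hm))]

-- an infix avoiding the separator b lies entirely left or entirely right of it
theorem pv_infix_split (b : Char) (cc : List Char) : ∀ (a : List Char) (kw : List Char), b ∉ kw →
    (kw <:+: a ++ b :: cc ↔ kw <:+: a ∨ kw <:+: cc) := by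
  intro a
  induction a with
  | nil =>
    intro kw hb
    rw [List.nil_append, List.infix_cons_iff,
      show (b :: cc : List Char) = [] ++ b :: cc from rfl, pv_prefix_split b [] kw hb]
    simp [List.prefix_nil, List.infix_nil]
  | cons x a' ihp =>
    intro kw hb
    rw [List.cons_append, List.infix_cons_iff,
      show (x :: (a' ++ b :: cc) : List Char) = (x :: a') ++ b :: cc from rfl,
      pv_prefix_split b (x :: a') kw hb, ihp kw hb, List.infix_cons_iff]
    tauto

theorem pv_lowerChar_isB (c : Char) (h : pvIsB c = true) : PySem.Chars.lowerChar c = c := by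
  unfold PySem.Chars.lowerChar
  split
  next hu =>
    exfalso
    simp only [PySem.Chars.isupper, Bool.and_eq_true, decide_eq_true_eq, Char.le_def] at hu
    simp only [pvIsB, Bool.or_eq_true, decide_eq_true_eq] at h
    have h1 : (65 : UInt32) ≤ c.val := hu.1
    have h2 : c.val ≤ 90 := hu.2
    have h3 := UInt32.le_iff_toNat_le.mp h1
    have h4 := UInt32.le_iff_toNat_le.mp h2
    have : c.toNat = c.val.toNat := rfl
    have e1 : (65 : UInt32).toNat = 65 := rfl
    have e2 : (90 : UInt32).toNat = 90 := rfl
    omega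
  · rfl

-- KEY LEMMA: a nonempty keyword with no line-break characters occurs in the lowercased
-- text iff it occurs in the lowercase of one of its lines (stated on splitlines.go).
theorem pv_go_key (kw : List Char) (hne : kw ≠ []) (hkw : ∀ c ∈ kw, pvIsB c = false)
    (n : Nat) : ∀ (s : List Char), s.length ≤ n → ∀ cur,
    ((∃ l ∈ PySem.Chars.splitlines.go pvIsB s cur [], kw <:+: PySem.Chars.lower l) ↔
      kw <:+: PySem.Chars.lower (cur.reverse ++ s)) := by
  have hnotmem : ∀ b, pvIsB b = true → b ∉ kw := by
    intro b hbB hmem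
    rw [hkw b hmem] at hbB; exact absurd hbB (by simp)
  induction n with
  | zero =>
    intro s hs cur
    rw [List.eq_nil_of_length_eq_zero (Nat.le_zero.mp hs)]
    rw [pv_go_nil]
    split
    next hcur =>
      rw [List.isEmpty_iff] at hcur; subst hcur
      simp [PySem.Chars.lower, List.infix_nil, hne]
    next hcur =>
      simp
  | succ n ih =>
    intro s hs cur
    cases s with
    | nil =>
      rw [pv_go_nil]
      split
      next hcur =>
        rw [List.isEmpty_iff] at hcur; subst hcur
        simp [PySem.Chars.lower, List.infix_nil, hne]
      next hcur =>
        simp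
    | cons c rest =>
      by_cases hc : c = '\x0d' ∧ '\n' ∈ rest.take 1
      · obtain ⟨rfl, hn⟩ := hc
        cases rest with
        | nil => simp at hn
        | cons c2 r =>
          simp at hn; subst hn
          rw [pv_go_crlf, pv_go_acc n r (by simp at hs; omega) [] [List.reverse cur]]
          have hih := ih r (by simp at hs; omega) []
          constructor
          · rintro ⟨l, hl, hkl⟩
            simp only [List.reverse_cons, List.reverse_nil, List.nil_append, List.cons_append,
              List.mem_cons] at hl
            rcases hl with rfl | hl
            · -- kw in the finished line cur.reverse
              simp only [PySem.Chars.lower, List.map_append, List.map_cons]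
              rw [show PySem.Chars.lowerChar '\x0d' = '\x0d' from rfl,
                show PySem.Chars.lowerChar '\n' = '\n' from rfl,
                pv_infix_split '\x0d' _ _ kw (hnotmem _ rfl)]
              left; exact hkl
            · have : kw <:+: PySem.Chars.lower r := by
                rw [← List.nil_append r]
                exact (hih).mp ⟨l, by simpa using hl, hkl⟩
              simp only [PySem.Chars.lower, List.map_append, List.map_cons]
              rw [show PySem.Chars.lowerChar '\x0d' = '\x0d' from rfl,
                show PySem.Chars.lowerChar '\n' = '\n' from rfl,
                pv_infix_split '\x0d' _ _ kw (hnotmem _ rfl)]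
              right
              rw [show ('\n' :: List.map PySem.Chars.lowerChar r : List Char) =
                [] ++ '\n' :: List.map PySem.Chars.lowerChar r from rfl,
                pv_infix_split '\n' _ _ kw (hnotmem _ rfl)]
              right; exact this
          · intro hin
            simp only [PySem.Chars.lower, List.map_append, List.map_cons] at hin
            rw [show PySem.Chars.lowerChar '\x0d' = '\x0d' from rfl,
              show PySem.Chars.lowerChar '\n' = '\n' from rfl,
              pv_infix_split '\x0d' _ _ kw (hnotmem _ rfl)] at hin
            rcases hin with hin | hin
            · exact ⟨cur.reverse, by simp, hin⟩
            · rw [show ('\n' :: List.map PySem.Chars.lowerChar r : List Char) =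
                [] ++ '\n' :: List.map PySem.Chars.lowerChar r from rfl,
                pv_infix_split '\n' _ _ kw (hnotmem _ rfl)] at hin
              rcases hin with hin | hin
              · exact absurd hin (by simp [List.infix_nil, hne])
              · obtain ⟨l, hl, hkl⟩ := (hih).mpr (by simpa [PySem.Chars.lower] using hin)
                exact ⟨l, by simp [hl], hkl⟩
      · rw [pv_go_cons c rest cur [] hc]
        split
        next hB =>
          rw [pv_go_acc n rest (by simp at hs; omega) [] [List.reverse cur]]
          have hih := ih rest (by simp at hs; omega) []
          have hsplit : kw <:+: PySem.Chars.lower (cur.reverse ++ c :: rest) ↔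
              (kw <:+: PySem.Chars.lower cur.reverse ∨ kw <:+: PySem.Chars.lower rest) := by
            simp only [PySem.Chars.lower, List.map_append, List.map_cons]
            rw [pv_lowerChar_isB c hB, pv_infix_split c _ _ kw (hnotmem c hB)]
          rw [hsplit]
          constructor
          · rintro ⟨l, hl, hkl⟩
            simp only [List.reverse_cons, List.reverse_nil, List.nil_append,
              List.cons_append, List.mem_cons] at hl
            rcases hl with rfl | hl
            · left; exact hkl
            · right
              rw [show PySem.Chars.lower rest = PySem.Chars.lower ([].reverse ++ rest) by simp]
              exact hih.mp ⟨l, by simpa using hl, hkl⟩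
          · rintro (hin | hin)
            · exact ⟨cur.reverse, by simp, hin⟩
            · obtain ⟨l, hl, hkl⟩ := hih.mpr (by simpa using hin)
              exact ⟨l, by simp [hl], hkl⟩
        next hB =>
          rw [ih rest (by simp at hs; omega) (c :: cur)]
          simp

theorem pv_splitlines_key (kw : List Char) (hne : kw ≠ []) (hkw : ∀ c ∈ kw, pvIsB c = false)
    (s : List Char) :
    ((∃ l ∈ PySem.Chars.splitlines s, kw <:+: PySem.Chars.lower l) ↔
      kw <:+: PySem.Chars.lower s) := by
  rw [pv_splitlines_eq]
  simpa using pv_go_key kw hne hkw s.length s le_rfl []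

theorem pv_inner_any (kws : List (List Char)) (line : List Char) :
    pvAInner kws line = kws.any (fun kw => PySem.Chars.isIn kw (PySem.Chars.lower line)) := by
  induction kws with
  | nil => rfl
  | cons kw kws ih => simp only [pvAInner, List.any_cons, ih]; split <;> simp_all

theorem pv_lines_any (kws : List (List Char)) (lines : List (List Char)) :
    pvALines kws lines = !(lines.any (fun l => pvAInner kws l)) := by
  induction lines with
  | nil => rfl
  | cons l ls ih => simp only [pvALines, List.any_cons, ih]; split <;> simp_all

theorem pv_keywords_ok : ∀ kw ∈ ([['d','e','f',' '], ['c','l','a','s','s',' '],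
      ['f','o','r',' '], ['w','h','i','l','e',' ']] : List (List Char)),
    kw ≠ [] ∧ ∀ c ∈ kw, pvIsB c = false := by
  intro kw h
  fin_cases h <;> exact ⟨by simp, fun c hc => by fin_cases hc <;> rfl⟩

theorem pv_kw_lists : ["def ".toList, "class ".toList, "for ".toList, "while ".toList] =
    ([['d','e','f',' '], ['c','l','a','s','s',' '], ['f','o','r',' '], ['w','h','i','l','e',' ']] :
      List (List Char)) := by simp

theorem pv_body_eq (d : List Char) :
    pvALines ["def ".toList, "class ".toList, "for ".toList, "while ".toList]
        (PySem.Chars.splitlines d) =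
      !(["def ".toList, "class ".toList, "for ".toList, "while ".toList].any
          (fun kw => PySem.Chars.isIn kw (PySem.Chars.lower d))) := by
  rw [pv_lines_any, pv_kw_lists]
  congr 1
  rw [Bool.eq_iff_iff]
  simp only [List.any_eq_true, pv_inner_any, PySem.Chars.isIn_iff_infix]
  constructor
  · rintro ⟨l, hl, kw, hkw, hin⟩
    exact ⟨kw, hkw, (pv_splitlines_key kw (pv_keywords_ok kw hkw).1 (pv_keywords_ok kw hkw).2 d).mp
      ⟨l, hl, hin⟩⟩
  · rintro ⟨kw, hkw, hin⟩
    obtain ⟨l, hl, hkl⟩ :=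
      (pv_splitlines_key kw (pv_keywords_ok kw hkw).1 (pv_keywords_ok kw hkw).2 d).mpr hin
    exact ⟨l, hl, kw, hkw, hkl⟩

-- ===== VERDICT (by name: the statement is the Claim_ definition above) =====
theorem has_no_keywords_spec : Claim_equal_has_no_keywords := by
  intro data language _
  unfold Spec_has_no_keywords has_no_keywords has_no_keywords_alt
  simp only [bne]
  cases h : (PySem.Str.lower language == "python") with
  | false => simp
  | true =>
    simp only [Bool.not_true, Bool.false_eq_true, if_true, if_false]
    exact pv_body_eq data.toList
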